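-- pv_equiv track=rewrite | github.com/gongohsamgong/AlgorithmStudy | study/7795.py | solution
-- ===== SOURCE A (Python) =====
-- def solution(n, m, a, b):
--     count = 0
--     b.sort()
--     for i in range(n):
--         if a[i] > max(b):
--             count += m
--             continue
--         for j in range(m):
--             if a[i] > b[j]:
--                 count += 1
--             else:
--                 break
--     return count
-- ===== SOURCE B (Python) =====
-- def solution(n, m, a, b):
--     # sort b once, then answer each query with a binary search (bisect_left by hand,
--     # since we may not import bisect): elements of b smaller than x form a sorted prefix.
--     b.sort()
--     total = 0
--     for x in (a[:n] if n > 0 else []):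
--         if b and x > b[-1]:
--             total += m
--         else:
--             lo, hi = 0, len(b)
--             while lo < hi:
--                 mid = (lo + hi) // 2
--                 if b[mid] < x:
--                     lo = mid + 1
--                 else:
--                     hi = mid
--             total += min(lo, m)
--     return total
-- ===== Notes on version B (the rewrite author's own statement) =====
-- stated objective: faster
-- what changed: Replaces A's inner linear scan with break (O(n*m)) by one sort of b plus a hand-written bisect_left binary search per element of a, summing min(count_of_smaller, m); Pre_ excludes (for n > 0) negative m, outside the natural domain, where A mixes 'count += m' with empty inner ranges.
-- outside the precondition, e.g. on solution(1, -2, [2], [1, 3]): A returns 0, B returns -2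
import Mathlib
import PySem

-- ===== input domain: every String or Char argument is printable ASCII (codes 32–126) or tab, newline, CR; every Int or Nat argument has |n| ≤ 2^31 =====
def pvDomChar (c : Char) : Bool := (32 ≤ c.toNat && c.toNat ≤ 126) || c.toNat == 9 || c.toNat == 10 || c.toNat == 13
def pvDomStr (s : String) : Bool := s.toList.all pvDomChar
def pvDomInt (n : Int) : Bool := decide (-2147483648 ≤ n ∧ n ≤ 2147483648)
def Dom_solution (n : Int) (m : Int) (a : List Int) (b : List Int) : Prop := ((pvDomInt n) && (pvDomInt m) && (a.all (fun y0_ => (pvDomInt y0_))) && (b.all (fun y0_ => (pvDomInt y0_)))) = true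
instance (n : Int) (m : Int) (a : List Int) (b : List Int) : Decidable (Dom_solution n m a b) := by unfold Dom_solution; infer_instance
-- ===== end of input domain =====

-- B replaces A's O(n*m) inner scan-with-break by one sort of b plus a hand-written
-- bisect_left binary search per element of a (both A and B sort b in place; the
-- equivalence proved here is about the return value).


-- ===== PORT A =====
-- inner 'for j in range(m): if a[i] > b[j]: count += 1 else: break' loop;
-- b[j] via pyGetD: inside Pre_ the loop always breaks before an out-of-range index.
def solutionInnerA (x : Int) (bs : List Int) : List Int → Int
  | [] => 0
  | j :: js => if x > PySem.List.pyGetD bs j 0 then 1 + solutionInnerA x bs js else 0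

def solution (n : Int) (m : Int) (a : List Int) (b : List Int) : Int :=
  let bs := PySem.List.sorted b (fun y => y)      -- b.sort()
  (PySem.List.pyRange 0 n 1).foldl
    (fun count i =>
      let x := PySem.List.pyGetD a i 0            -- a[i]; in range inside Pre_
      if x > (PySem.List.max? bs (fun y => y)).getD 0 then count + m   -- max(b); b ≠ [] inside Pre_
      else count + solutionInnerA x bs (PySem.List.pyRange 0 m 1)) 0

-- ===== PORT B =====
-- hand-written bisect_left loop: 'while lo < hi: mid = (lo+hi)//2; ...';
-- fuel only bounds the iteration count (hi - lo shrinks every step), it never changes the value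
def solutionBl (bs : List Int) (x : Int) : Nat → Nat → Nat → Nat
  | 0, lo, _ => lo
  | fuel + 1, lo, hi =>
    if lo < hi then
      let mid := (lo + hi) / 2
      if bs.getD mid 0 < x then solutionBl bs x fuel (mid + 1) hi
      else solutionBl bs x fuel lo mid
    else lo

def solution_alt (n : Int) (m : Int) (a : List Int) (b : List Int) : Int :=
  let bs := PySem.List.sorted b (fun y => y)      -- b.sort()
  (if 0 < n then a.take n.toNat else []).foldl    -- for x in a[:n] (empty for n ≤ 0)
    (fun total x =>
      if bs ≠ [] ∧ x > PySem.List.pyGetD bs (-1) 0 then total + m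
      else total + min (solutionBl bs x bs.length 0 bs.length : Int) m) 0

-- ===== PRECONDITION & SPEC =====
-- Pre_ excludes, for n > 0 only, negative m (outside the natural domain: m is the
-- count of usable elements of b; A then mixes 'count += m' with empty inner ranges)
-- and the inputs where A raises (n > len(a): IndexError; b = []: ValueError from max).
def Pre_solution (n : Int) (m : Int) (a : List Int) (b : List Int) : Prop :=
  n ≤ (a.length : Int) ∧ (n ≤ 0 ∨ (b ≠ [] ∧ 0 ≤ m))
instance (n : Int) (m : Int) (a : List Int) (b : List Int) : Decidable (Pre_solution n m a b) := by unfold Pre_solution; infer_instance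
def pvWitness_solution : Int × Int × List Int × List Int := (2, 2, [3, 1], [2, 4])

def Spec_solution (n : Int) (m : Int) (a : List Int) (b : List Int) (out : Int) : Prop := out = solution_alt n m a b
instance (n : Int) (m : Int) (a : List Int) (b : List Int) (out : Int) : Decidable (Spec_solution n m a b out) := by unfold Spec_solution; infer_instance

-- ===== CLAIM (what is proved, stated in full; the proofs are below) =====
def Claim_equal_solution : Prop := ∀ (n : Int) (m : Int) (a : List Int) (b : List Int), Dom_solution n m a b → Pre_solution n m a b → Spec_solution n m a b (solution n m a b)

-- ===== LEMMAS AND PROOFS =====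

-- bs[-1] is the last element of a non-empty list
theorem pyGetD_neg_one (bs : List Int) (hb : bs ≠ []) :
    PySem.List.pyGetD bs (-1) 0 = bs[bs.length - 1]'(by
      have : 0 < bs.length := List.length_pos_iff.mpr hb
      omega) := by
  have hlen : 0 < bs.length := List.length_pos_iff.mpr hb
  simp [PySem.List.pyGetD, PySem.List.pyGet?, PySem.List.pyIdx?]
  rw [if_pos (by omega)]
  simp [List.getElem?_eq_getElem (by omega : bs.length - 1 < bs.length)]

-- the binary-search loop of B computes bisect_left on a sorted list
theorem solutionBl_eq_bisectLeft (bs : List Int) (x : Int)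
    (hs : List.Pairwise (fun p q => p ≤ q) bs) :
    ∀ lo hi, lo ≤ PySem.List.bisectLeft bs x → PySem.List.bisectLeft bs x ≤ hi →
      hi ≤ bs.length → ∀ fuel, hi - lo ≤ fuel → solutionBl bs x fuel lo hi = PySem.List.bisectLeft bs x := by
  obtain ⟨hle, hlt, hge⟩ := PySem.List.bisectLeft_spec bs x hs
  intro lo hi h1 h2 h3 fuel
  induction fuel generalizing lo hi with
  | zero => intro hf; simp [solutionBl]; omega
  | succ fuel ih =>
    intro hf
    by_cases hlh : lo < hi
    · have hmid : (lo + hi) / 2 < hi := by omega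
      have hmid2 : lo ≤ (lo + hi) / 2 := by omega
      have hml : (lo + hi) / 2 < bs.length := by omega
      by_cases hbm : bs.getD ((lo + hi) / 2) 0 < x
      · have : (lo + hi) / 2 < PySem.List.bisectLeft bs x := by
          by_contra hh
          have := hge ((lo + hi) / 2) hml (by omega)
          rw [List.getD_eq_getElem bs 0 hml] at hbm
          omega
        simp only [solutionBl, if_pos hlh, if_pos hbm]
        exact ih ((lo + hi) / 2 + 1) hi (by omega) h2 h3 (by omega)
      · have : PySem.List.bisectLeft bs x ≤ (lo + hi) / 2 := by
          by_contra hh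
          have := hlt ((lo + hi) / 2) hml (by omega)
          rw [List.getD_eq_getElem bs 0 hml] at hbm
          omega
        simp only [solutionBl, if_pos hlh, if_neg hbm]
        exact ih lo ((lo + hi) / 2) h1 (by omega) (by omega) (by omega)
    · simp [solutionBl, if_neg hlh]; omega

-- A's break-loop over range(k, k+t) counts min t (c - k) elements, c = bisect_left
theorem solutionInnerA_eq (x : Int) (bs : List Int)
    (hs : List.Pairwise (fun p q => p ≤ q) bs)
    (hc : PySem.List.bisectLeft bs x < bs.length) :
    ∀ (t k : Nat), k ≤ PySem.List.bisectLeft bs x →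
      solutionInnerA x bs (PySem.List.pyRange (k : Int) ((k : Int) + (t : Int)) 1)
        = ((min t (PySem.List.bisectLeft bs x - k) : Nat) : Int) := by
  obtain ⟨hle, hlt, hge⟩ := PySem.List.bisectLeft_spec bs x hs
  intro t
  induction t with
  | zero => intro k hk; rw [PySem.List.pyRange_one_eq_nil (by omega)]; simp [solutionInnerA]
  | succ t ih =>
    intro k hk
    rw [PySem.List.pyRange_one_cons (by push_cast; omega)]
    have hkl : k < bs.length := by omega
    have hget : PySem.List.pyGetD bs (k : Int) 0 = bs[k] :=
      PySem.List.pyGetD_eq_getElem bs 0 (by omega) (by exact_mod_cast hkl)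
    by_cases hkc : k < PySem.List.bisectLeft bs x
    · have hx : x > PySem.List.pyGetD bs (k : Int) 0 := by
        rw [hget]; exact hlt k hkl hkc
      simp only [solutionInnerA, if_pos hx]
      have h2 : ((k : Int) + 1) = ((k + 1 : Nat) : Int) := by push_cast; ring
      have h3 : ((k : Int) + ((t + 1 : Nat) : Int)) = (((k + 1 : Nat) : Int) + (t : Nat)) := by push_cast; ring
      rw [h2, h3, ih (k + 1) (by omega)]
      push_cast; omega
    · have hkeq : k = PySem.List.bisectLeft bs x := by omega
      have hx : ¬ x > PySem.List.pyGetD bs (k : Int) 0 := by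
        rw [hget]
        have := hge k hkl (by omega)
        omega
      simp only [solutionInnerA, if_neg hx]
      omega

-- on a sorted non-empty list, max(bs) is the last element
theorem max_eq_last (b : List Int)
    (hb : PySem.List.sorted b (fun y => y) ≠ []) :
    ((PySem.List.max? (PySem.List.sorted b (fun y => y)) (fun y => y)).getD 0)
      = PySem.List.pyGetD (PySem.List.sorted b (fun y => y)) (-1) 0 := by
  set bs := PySem.List.sorted b (fun y => y) with hbs
  have hlen : 0 < bs.length := List.length_pos_iff.mpr hb
  have hr := pyGetD_neg_one bs hb
  obtain ⟨mx, hmx⟩ : ∃ mx, PySem.List.max? bs (fun y => y) = some mx := by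
    cases h : PySem.List.max? bs (fun y => y) with
    | none => exact absurd ((PySem.List.max?_eq_none_iff bs _).mp h) hb
    | some mx => exact ⟨mx, rfl⟩
  have hmem := PySem.List.max?_mem hmx
  have hmax := PySem.List.max?_isMax hmx
  obtain ⟨i, hi, hieq⟩ := List.mem_iff_getElem.mp hmem
  have h1 : mx ≤ bs[bs.length - 1] := by
    have h := PySem.List.sorted_id_getElem_mono b (p := i) (q := bs.length - 1) (by omega)
      (by simp only [← hbs]; omega)
    rw [← hieq]
    exact h
  have h2 : bs[bs.length - 1] ≤ mx := hmax _ (List.getElem_mem _)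
  rw [hmx, hr]
  simp
  omega

-- the per-element bodies of the two folds agree (b non-empty, 0 ≤ m)
theorem solution_body_eq (m : Int) (b : List Int) (hm : 0 ≤ m)
    (hb : PySem.List.sorted b (fun y => y) ≠ []) (acc x : Int) :
    (if x > (PySem.List.max? (PySem.List.sorted b (fun y => y)) (fun y => y)).getD 0 then acc + m
     else acc + solutionInnerA x (PySem.List.sorted b (fun y => y)) (PySem.List.pyRange 0 m 1))
    = (if PySem.List.sorted b (fun y => y) ≠ [] ∧
          x > PySem.List.pyGetD (PySem.List.sorted b (fun y => y)) (-1) 0 then acc + m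
       else acc + min (solutionBl (PySem.List.sorted b (fun y => y)) x
              (PySem.List.sorted b (fun y => y)).length 0
              (PySem.List.sorted b (fun y => y)).length : Int) m) := by
  set bs := PySem.List.sorted b (fun y => y) with hbs
  have hs : List.Pairwise (fun p q => p ≤ q) bs := PySem.List.sorted_pairwise b (fun y => y)
  have hlen : 0 < bs.length := List.length_pos_iff.mpr hb
  obtain ⟨hle, hlt, hge⟩ := PySem.List.bisectLeft_spec bs x hs
  rw [max_eq_last b hb]
  by_cases hx : x > PySem.List.pyGetD bs (-1) 0
  · rw [if_pos hx, if_pos ⟨hb, hx⟩]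
  · rw [if_neg hx, if_neg (by tauto)]
    have hlast := pyGetD_neg_one bs hb
    have hc : PySem.List.bisectLeft bs x < bs.length := by
      by_contra hh
      have := hlt (bs.length - 1) (by omega) (by omega)
      rw [hlast] at hx
      omega
    have hbl : solutionBl bs x bs.length 0 bs.length = PySem.List.bisectLeft bs x :=
      solutionBl_eq_bisectLeft bs x hs 0 bs.length (by omega) (by omega) le_rfl bs.length (by omega)
    have hin := solutionInnerA_eq x bs hs hc m.toNat 0 (by omega)
    simp only [Nat.cast_zero] at hin
    rw [show (0 : Int) + (m.toNat : Int) = m by omega] at hin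
    rw [hin, hbl]
    have : (PySem.List.bisectLeft bs x : Int) ≤ (bs.length : Int) := by exact_mod_cast hle
    push_cast
    omega

-- the indices range(n) read through a[i] is the prefix a[:n]  (0 ≤ n ≤ len a)
theorem map_pyGetD_range_take (a : List Int) (n : Int) (hn : 0 ≤ n) (hna : n ≤ (a.length : Int)) :
    (PySem.List.pyRange 0 n 1).map (fun j => PySem.List.pyGetD a j 0) = a.take n.toNat := by
  apply List.ext_getElem
  · simp [PySem.List.length_pyRange_one]
    omega
  · intro k h1 h2
    simp only [List.getElem_map, PySem.List.getElem_pyRange_one, List.getElem_take]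
    have hk : k < n.toNat := by
      simpa [PySem.List.length_pyRange_one] using h1
    rw [show (0 : Int) + (k : Int) = (k : Int) by ring]
    exact PySem.List.pyGetD_eq_getElem a 0 (by omega) (by omega)

theorem solution_spec' (n m : Int) (a : List Int) (b : List Int) (h : Pre_solution n m a b) :
    solution n m a b = solution_alt n m a b := by
  obtain ⟨hna, hnb⟩ := h
  by_cases hn : 0 < n
  · obtain ⟨hb, hm⟩ : b ≠ [] ∧ 0 ≤ m := by
      rcases hnb with h' | h'
      · omega
      · exact h'
    have hbs : PySem.List.sorted b (fun y => y) ≠ [] := by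
      rw [Ne, PySem.List.sorted_eq_nil_iff]
      exact hb
    show (PySem.List.pyRange 0 n 1).foldl _ 0 = _
    rw [show solution_alt n m a b
          = (a.take n.toNat).foldl
              (fun total x =>
                if PySem.List.sorted b (fun y => y) ≠ [] ∧
                    x > PySem.List.pyGetD (PySem.List.sorted b (fun y => y)) (-1) 0 then total + m
                else total + min (solutionBl (PySem.List.sorted b (fun y => y)) x
                      (PySem.List.sorted b (fun y => y)).length 0
                      (PySem.List.sorted b (fun y => y)).length : Int) m) 0 by
        simp only [solution_alt, if_pos hn]]
    rw [← map_pyGetD_range_take a n (by omega) hna, List.foldl_map]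
    exact PySem.List.foldl_congr_mem _ _ _ 0
      (fun acc j _ => solution_body_eq m b hm hbs acc (PySem.List.pyGetD a j 0))
  · have hr : PySem.List.pyRange 0 n 1 = [] := PySem.List.pyRange_one_eq_nil (by omega)
    simp only [solution, solution_alt, hr, if_neg hn, List.foldl_nil]

-- ===== VERDICT (by name: the statement is the Claim_ definition above) =====
theorem solution_spec : Claim_equal_solution := by
  intro n m a b _ hpre
  exact solution_spec' n m a b hpre
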